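-- pv_equiv track=rewrite | github.com/lukasmikulec/our-garden-of-emotions | our_garden_of_emotions.py | count_number_of_flowers
-- ===== SOURCE A (Python) =====
-- def count_number_of_flowers(emotion, person_list):
--     # Start with 0 for both flower and emotion count
--     flower_count = 0
--     emotion_count = 0
--
--     # Check if the first item in list is the emotion
--     if person_list[0] == emotion:
--         # If yes, add 1 to the emotion's count and add one flower
--         emotion_count = 1
--         flower_count = 1
--
--     # For the rest of the items (apart from the first)
--     for i in range(len(person_list)-1):
--         # If the emotion's streak starts
--         if person_list[i+1] == emotion and person_list[i] != emotion:
--             # Add one to emotion's count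
--             emotion_count += 1
--             # Add so many flowers like the current streak
--             flower_count += emotion_count
--         # If the emotion's streak continues
--         if person_list[i+1] == emotion and person_list[i] == emotion:
--             # Add one to emotion's count
--             emotion_count += 1
--             # Add so many flowers like the current streak
--             flower_count += emotion_count
--
--         # If the emotion's streak ends
--         if person_list[i+1] != emotion and person_list[i] == emotion:
--             # Resent the emotion's counter to zero
--             emotion_count = 0
--
--     # Return flower count
--     return flower_count
-- ===== SOURCE B (Python) =====
-- def count_number_of_flowers(emotion, person_list):
--     # Sum a closed-form triangular number for each maximal run of `emotion`.
--     total = 0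
--     i = 0
--     n = len(person_list)
--     while i < n:
--         if person_list[i] == emotion:
--             j = i
--             while j < n and person_list[j] == emotion:
--                 j += 1
--             run = j - i
--             total += run * (run + 1) // 2
--             i = j
--         else:
--             i += 1
--     return total
-- ===== Notes on version B (the rewrite author's own statement) =====
-- stated objective: alternative
-- what changed: Replaces the incremental streak accumulator (three conditional updates per adjacent pair) with a run-length scan that adds the closed-form triangular number run*(run+1)//2 for each maximal run of the emotion.
import Mathlib
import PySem

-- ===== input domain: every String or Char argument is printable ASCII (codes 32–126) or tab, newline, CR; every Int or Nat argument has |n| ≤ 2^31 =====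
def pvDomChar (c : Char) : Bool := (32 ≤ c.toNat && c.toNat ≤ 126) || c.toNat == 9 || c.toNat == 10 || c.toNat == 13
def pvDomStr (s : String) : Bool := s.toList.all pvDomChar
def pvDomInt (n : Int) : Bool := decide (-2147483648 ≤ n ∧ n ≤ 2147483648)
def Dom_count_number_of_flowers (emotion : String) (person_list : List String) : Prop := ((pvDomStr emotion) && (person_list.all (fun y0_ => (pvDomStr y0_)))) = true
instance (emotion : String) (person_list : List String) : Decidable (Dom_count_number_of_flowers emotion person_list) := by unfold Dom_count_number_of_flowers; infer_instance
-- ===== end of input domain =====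

-- B replaces A's per-element streak accumulator with a per-run scan adding a closed-form triangular number
-- per maximal run (alternative algorithm, same O(n) cost). Pre_ excludes only the empty list, where A raises
-- IndexError (it reads person_list[0] unconditionally); B naturally returns 0 there.


-- ===== PORT A =====
-- A's loop body (the three sequential ifs, in Python's order) on state (flower_count, emotion_count),
-- where cur = person_list[i] and nxt = person_list[i+1].
def stepP (emotion : String) (st : Int × Int) (cur nxt : String) : Int × Int :=
  let st1 := if nxt == emotion && !(cur == emotion) then (st.1 + (st.2 + 1), st.2 + 1) else st
  let st2 := if nxt == emotion && (cur == emotion) then (st1.1 + (st1.2 + 1), st1.2 + 1) else st1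
  if !(nxt == emotion) && (cur == emotion) then (st2.1, 0) else st2

def count_number_of_flowers (emotion : String) (person_list : List String) : Int :=
  -- init = state after the initial if on person_list[0] (Pre_ guarantees the index is in range);
  -- then for i in range(len(person_list)-1): the three ifs on (flower_count, emotion_count)
  ((PySem.List.pyRange 0 ((person_list.length : Int) - 1) 1).foldl
      (fun st i => stepP emotion st (PySem.List.pyGetD person_list i "")
        (PySem.List.pyGetD person_list (i + 1) ""))
      (if PySem.List.pyGetD person_list 0 "" == emotion then ((1 : Int), (1 : Int)) else (0, 0))).1

-- ===== PORT B =====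
-- B's outer while-loop (cnf_go, over the remaining suffix) and inner while-loop
-- (cnf_in, advancing through the current run carrying its length `run`).
mutual
def cnf_go (emotion : String) : List String → Int
  | [] => 0
  | x :: xs => if x == emotion then cnf_in emotion 1 xs else cnf_go emotion xs

def cnf_in (emotion : String) (run : Int) : List String → Int
  | [] => PySem.Int.floordiv (run * (run + 1)) 2
  | y :: ys =>
    if y == emotion then cnf_in emotion (run + 1) ys
    else PySem.Int.floordiv (run * (run + 1)) 2 + cnf_go emotion ys
end

def count_number_of_flowers_alt (emotion : String) (person_list : List String) : Int :=
  cnf_go emotion person_list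

-- ===== PRECONDITION & SPEC =====
-- A reads person_list[0] unconditionally, so it raises IndexError exactly on the empty list.
def Pre_count_number_of_flowers (emotion : String) (person_list : List String) : Prop :=
  person_list ≠ []
instance (emotion : String) (person_list : List String) : Decidable (Pre_count_number_of_flowers emotion person_list) := by unfold Pre_count_number_of_flowers; infer_instance

def pvWitness_count_number_of_flowers : String × List String := ("a", ["a", "b", "a", "a"])

def Spec_count_number_of_flowers (emotion : String) (person_list : List String) (out : Int) : Prop := out = count_number_of_flowers_alt emotion person_list
instance (emotion : String) (person_list : List String) (out : Int) : Decidable (Spec_count_number_of_flowers emotion person_list out) := by unfold Spec_count_number_of_flowers; infer_instance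

-- ===== CLAIM (what is proved, stated in full; the proofs are below) =====
def Claim_equal_count_number_of_flowers : Prop := ∀ (emotion : String) (person_list : List String), Dom_count_number_of_flowers emotion person_list → Pre_count_number_of_flowers emotion person_list → Spec_count_number_of_flowers emotion person_list (count_number_of_flowers emotion person_list)

-- ===== LEMMAS AND PROOFS =====

-- A's loop re-expressed as a fold over adjacent pairs of a suffix.
def foldPairs (emotion : String) : List String → (Int × Int) → (Int × Int)
  | [], st => st
  | [_], st => st
  | x :: y :: r, st => foldPairs emotion (y :: r) (stepP emotion st x y)

-- triangular-number step: (c+1)(c+2)//2 = c(c+1)//2 + (c+1), for every integer c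
lemma triform_succ (c : Int) :
    PySem.Int.floordiv ((c + 1) * (c + 1 + 1)) 2
      = PySem.Int.floordiv (c * (c + 1)) 2 + (c + 1) := by
  rw [PySem.Int.floordiv_eq_ediv_of_pos (by omega), PySem.Int.floordiv_eq_ediv_of_pos (by omega)]
  obtain ⟨m, hm⟩ := Int.even_mul_succ_self c
  have h2 : (c + 1) * (c + 1 + 1) = c * (c + 1) + 2 * (c + 1) := by ring
  omega

lemma fold_idx (emotion : String) (full : List String) :
    ∀ (l pre : List String), full = pre ++ l → ∀ st : Int × Int,
    (PySem.List.pyRange (pre.length : Int) ((full.length : Int) - 1) 1).foldl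
      (fun st i => stepP emotion st (PySem.List.pyGetD full i "")
        (PySem.List.pyGetD full (i + 1) "")) st
    = foldPairs emotion l st := by
  intro l
  induction l with
  | nil =>
    intro pre h st
    rw [PySem.List.pyRange_one_eq_nil (by subst h; simp)]
    rfl
  | cons x xs ih =>
    intro pre h st
    match xs, ih with
    | [], _ =>
      rw [PySem.List.pyRange_one_eq_nil (by subst h; simp)]
      rfl
    | y :: r, ih =>
      have hlen : (full.length : Int) = pre.length + r.length + 2 := by
        subst h; simp; omega
      rw [PySem.List.pyRange_one_cons (by omega), List.foldl_cons]
      have hx : PySem.List.pyGetD full (pre.length : Int) "" = x := by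
        subst h
        rw [PySem.List.pyGetD_natCast]
        simp [List.getD_eq_getElem?_getD]
      have hy : PySem.List.pyGetD full ((pre.length : Int) + 1) "" = y := by
        subst h
        rw [show ((pre.length : Int) + 1) = ((pre.length + 1 : Nat) : Int) by push_cast; ring,
          PySem.List.pyGetD_natCast]
        simp [List.getD_eq_getElem?_getD]
      rw [hx, hy]
      have h' : full = (pre ++ [x]) ++ (y :: r) := by subst h; simp
      have := ih (pre ++ [x]) h' (stepP emotion st x y)
      simpa using this

lemma comb (emotion : String) (xs : List String) :
    (∀ (fl c : Int),
      (foldPairs emotion (emotion :: xs) (fl, c)).1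
        = fl - PySem.Int.floordiv (c * (c + 1)) 2 + cnf_in emotion c xs)
    ∧ (∀ (x : String), (x == emotion) = false → ∀ fl : Int,
      (foldPairs emotion (x :: xs) (fl, 0)).1 = fl + cnf_go emotion xs) := by
  induction xs with
  | nil =>
    constructor
    · intro fl c; simp [foldPairs, cnf_in]
    · intro x hx fl; simp [foldPairs, cnf_go]
  | cons y r ih =>
    constructor
    · intro fl c
      by_cases hy : (y == emotion) = true
      · have : y = emotion := by simpa using hy
        subst this
        simp only [foldPairs, stepP, beq_self_eq_true, Bool.not_true, Bool.and_false,
          Bool.and_true, Bool.false_eq_true, if_false, reduceIte]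
        rw [ih.1 (fl + (c + 1)) (c + 1), cnf_in]
        simp only [beq_self_eq_true, if_true]
        have := triform_succ c
        omega
      · have hy' : (y == emotion) = false := by simpa using hy
        simp only [foldPairs, stepP, hy', beq_self_eq_true, Bool.not_true, Bool.and_false,
          Bool.not_false, Bool.and_true, Bool.false_eq_true, if_false, reduceIte]
        rw [ih.2 y hy' fl, cnf_in]
        simp only [hy', Bool.false_eq_true, if_false]
        omega
    · intro x hx fl
      by_cases hy : (y == emotion) = true
      · have : y = emotion := by simpa using hy
        subst this
        simp only [foldPairs, stepP, hx, beq_self_eq_true, Bool.not_false, Bool.and_true,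
          Bool.not_true, Bool.and_false, Bool.false_eq_true, if_false, reduceIte]
        rw [ih.1 (fl + (0 + 1)) (0 + 1)]
        simp only [cnf_go, beq_self_eq_true, if_true, zero_add]
        have : PySem.Int.floordiv ((1 : Int) * (1 + 1)) 2 = 1 := by decide
        omega
      · have hy' : (y == emotion) = false := by simpa using hy
        simp only [foldPairs, stepP, hx, hy', Bool.and_false, Bool.false_and, Bool.and_true,
          Bool.not_false, Bool.false_eq_true, if_false, reduceIte]
        rw [ih.2 y hy' fl]
        simp [cnf_go, hy']

-- ===== VERDICT (by name: the statement is the Claim_ definition above) =====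
theorem count_number_of_flowers_spec : Claim_equal_count_number_of_flowers := by
  intro emotion l _ hpre
  unfold Spec_count_number_of_flowers count_number_of_flowers count_number_of_flowers_alt
  match l, hpre with
  | h :: t, _ =>
    have hidx := fold_idx emotion (h :: t) (h :: t) [] rfl
    simp only [List.length_nil, Nat.cast_zero] at hidx
    by_cases hh : (h == emotion) = true
    · have : h = emotion := by simpa using hh
      subst this
      rw [PySem.List.pyGetD_zero_cons, if_pos (by simp), hidx]
      rw [(comb h t).1 1 1]
      simp only [cnf_go, beq_self_eq_true, if_true]
      have : PySem.Int.floordiv ((1 : Int) * (1 + 1)) 2 = 1 := by decide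
      omega
    · have hh' : (h == emotion) = false := by simpa using hh
      rw [PySem.List.pyGetD_zero_cons, if_neg (by simp [hh']), hidx]
      rw [(comb emotion t).2 h hh' 0]
      simp [cnf_go, hh']
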